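-- pv_equiv track=rewrite | github.com/UznetDev/i | folder/dublicate_zeros.py | dublicate_zeros
-- ===== SOURCE A (Python) =====
-- from typing import List
--
-- def dublicate_zeros(lst: List[int]) -> List:
--     i = 0
--     while i < len(lst):
--         if lst[i] == 0:
--             lst.insert(i+1, 0)
--             i+=2
--         else:
--             i += 1
--     return lst
-- ===== SOURCE B (Python) =====
-- from typing import List
--
-- def dublicate_zeros(lst: List[int]) -> List:
--     out = []
--     for x in lst:
--         out.append(x)
--         if x == 0:
--             out.append(0)
--     return out
-- ===== Notes on version B (the rewrite author's own statement) =====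
-- stated objective: faster
-- what changed: Replaced the index-driven while loop that repeatedly calls list.insert (each insert shifts the whole tail) with a single forward pass appending to a fresh output list, an extra 0 after each zero; B does not mutate its argument, A does.
import Mathlib
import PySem

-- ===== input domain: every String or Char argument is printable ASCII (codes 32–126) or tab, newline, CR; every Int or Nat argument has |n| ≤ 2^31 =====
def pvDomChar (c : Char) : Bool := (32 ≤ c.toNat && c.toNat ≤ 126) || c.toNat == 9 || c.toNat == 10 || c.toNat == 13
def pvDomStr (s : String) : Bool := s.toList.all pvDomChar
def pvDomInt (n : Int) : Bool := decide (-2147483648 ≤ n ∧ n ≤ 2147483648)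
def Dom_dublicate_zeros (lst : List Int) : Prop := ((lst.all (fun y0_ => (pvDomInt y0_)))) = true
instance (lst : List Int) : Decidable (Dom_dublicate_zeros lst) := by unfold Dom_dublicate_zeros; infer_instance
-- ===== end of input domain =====

-- B builds the duplicated list in a single forward pass instead of A's index loop with repeated list.insert;
-- A mutates its argument in place, B returns a fresh list — the equivalence proved is about the return value only.

-- ===== PORT A =====
-- while i < len(lst): if lst[i]==0: lst.insert(i+1,0); i+=2 else: i+=1
def dzLoop (lst : List Int) (i : Nat) : List Int :=
  if h : i < lst.length then
    if lst[i] = 0 then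
      dzLoop (PySem.List.insert lst ((i : Int) + 1) 0) (i + 2)
    else
      dzLoop lst (i + 1)
  else lst
termination_by lst.length - i
decreasing_by
  · have h1 : (i + 1 : Nat) ≤ lst.length := h
    have : ((i : Int) + 1) = ((i + 1 : Nat) : Int) := by push_cast; ring
    rw [this, PySem.List.insert_natCast lst (i+1) 0 h1]
    simp
    omega
  · omega

def dublicate_zeros (lst : List Int) : List Int := dzLoop lst 0

-- ===== PORT B =====
-- out = []; for x in lst: out.append(x); if x == 0: out.append(0); return out
def dublicate_zeros_alt (lst : List Int) : List Int :=
  lst.foldl (fun out x => if x = 0 then (out ++ [x]) ++ [0] else out ++ [x]) []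

-- ===== PRECONDITION & SPEC =====
def Spec_dublicate_zeros (lst : List Int) (out : List Int) : Prop := out = dublicate_zeros_alt lst
instance (lst : List Int) (out : List Int) : Decidable (Spec_dublicate_zeros lst out) := by unfold Spec_dublicate_zeros; infer_instance

-- ===== CLAIM (what is proved, stated in full; the proofs are below) =====
def Claim_equal_dublicate_zeros : Prop := ∀ (lst : List Int), Dom_dublicate_zeros lst → Spec_dublicate_zeros lst (dublicate_zeros lst)

-- ===== LEMMAS AND PROOFS =====

-- the mathematical result: each zero doubled
def dub : List Int → List Int
  | [] => []
  | x :: t => if x = 0 then 0 :: 0 :: dub t else x :: dub t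

theorem dzLoop_eq (lst : List Int) (i : Nat) :
    dzLoop lst i = lst.take i ++ dub (lst.drop i) := by
  rw [dzLoop]
  split
  · rename_i h
    have hdrop : lst.drop i = lst[i] :: lst.drop (i + 1) := List.drop_eq_getElem_cons h
    have htake1 : lst.take (i + 1) = lst.take i ++ [lst[i]] := by
      rw [List.take_add_one]
      simp [List.getElem?_eq_getElem h]
    split
    · rename_i hz
      have h1 : (i + 1 : Nat) ≤ lst.length := h
      have hcast : ((i : Int) + 1) = ((i + 1 : Nat) : Int) := by push_cast; ring
      rw [hcast, PySem.List.insert_natCast lst (i+1) 0 h1]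
      rw [dzLoop_eq (lst.take (i+1) ++ 0 :: lst.drop (i+1)) (i + 2)]
      have hre : lst.take (i+1) ++ 0 :: lst.drop (i+1)
          = (lst.take (i+1) ++ [0]) ++ lst.drop (i+1) := by simp
      have hlen2 : (lst.take (i+1) ++ [0]).length = i + 2 := by
        simp
        omega
      rw [hre, List.take_left' hlen2, List.drop_left' hlen2, hdrop, htake1, hz]
      simp [dub, List.append_assoc]
    · rename_i hz
      rw [dzLoop_eq lst (i + 1), hdrop, htake1, List.append_assoc, List.singleton_append]
      simp [dub, hz]
  · rename_i h
    have hle : lst.length ≤ i := by omega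
    simp [List.take_of_length_le hle, List.drop_of_length_le hle, dub]
termination_by lst.length - i
decreasing_by
  all_goals first
    | omega
    | (simp only [List.length_append, List.length_cons, List.length_take, List.length_drop]
       omega)

theorem alt_foldl_eq (lst : List Int) (acc : List Int) :
    lst.foldl (fun out x => if x = 0 then (out ++ [x]) ++ [0] else out ++ [x]) acc
      = acc ++ dub lst := by
  induction lst generalizing acc with
  | nil => simp [dub]
  | cons x t ih =>
    rw [List.foldl_cons]
    by_cases hz : x = 0
    · rw [if_pos hz, ih, hz]
      simp [dub]
    · rw [if_neg hz, ih]
      simp [dub, hz]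

-- ===== VERDICT (by name: the statement is the Claim_ definition above) =====
theorem dublicate_zeros_spec : Claim_equal_dublicate_zeros := by
  intro lst _
  unfold Spec_dublicate_zeros dublicate_zeros dublicate_zeros_alt
  rw [dzLoop_eq, alt_foldl_eq]
  simp
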